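-- pv_equiv track=rewrite | github.com/kocurvik/rdnet | utils/vis.py | get_experiments
-- ===== SOURCE A (Python) =====
-- def get_experiments(eq, geo_iters=(1,2,5,30)):
--     if eq:
--         experiments = ['Efeq_6pt', 'Efeq_6pt_s3', 'kFk_9pt']
--         experiments.extend([f'Efeq_6pt+Geo_VLO_{i}' for i in geo_iters])
--         experiments.extend([f'E_5pt+Geo_VLO_{i}' for i in geo_iters])
--         experiments.extend([f'E_3pt+Geo_VLO_{i}' for i in geo_iters])
--         experiments.extend([f'Efeq_6pt+Geo_V_{i}' for i in geo_iters])
--         experiments.extend([f'E_5pt+Geo_V_{i}' for i in geo_iters])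
--         experiments.extend([f'E_3pt+Geo_V_{i}' for i in geo_iters])
--     else:
--         experiments = ['F_7pt', 'F_7pt_s3', 'k2Fk1_10pt']
--         experiments.extend([f'E_5pt+Geo_VLO_{i}' for i in geo_iters])
--         experiments.extend([f'E_5pt+Geo_V_{i}' for i in geo_iters])
--         experiments.extend([f'E_3pt+Geo_VLO_{i}' for i in geo_iters])
--         experiments.extend([f'E_3pt+Geo_V_{i}' for i in geo_iters])
--     return experiments
-- ===== SOURCE B (Python) =====
-- def get_experiments(eq, geo_iters=(1, 2, 5, 30)):
--     if eq:
--         prefix = ['Efeq_6pt', 'Efeq_6pt_s3', 'kFk_9pt']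
--         combos = [(b, g) for g in ('VLO', 'V') for b in ('Efeq_6pt', 'E_5pt', 'E_3pt')]
--     else:
--         prefix = ['F_7pt', 'F_7pt_s3', 'k2Fk1_10pt']
--         combos = [(b, g) for b in ('E_5pt', 'E_3pt') for g in ('VLO', 'V')]
--     return prefix + [f'{b}+Geo_{g}_{i}' for b, g in combos for i in geo_iters]
-- ===== Notes on version B (the rewrite author's own statement) =====
-- stated objective: simpler
-- what changed: Replaces the six/four explicit extend calls of hard-coded f-string list comprehensions by one data-driven (base, geo-type) combo table per branch plus a single nested comprehension formatting '{b}+Geo_{g}_{i}'.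
import Mathlib
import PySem

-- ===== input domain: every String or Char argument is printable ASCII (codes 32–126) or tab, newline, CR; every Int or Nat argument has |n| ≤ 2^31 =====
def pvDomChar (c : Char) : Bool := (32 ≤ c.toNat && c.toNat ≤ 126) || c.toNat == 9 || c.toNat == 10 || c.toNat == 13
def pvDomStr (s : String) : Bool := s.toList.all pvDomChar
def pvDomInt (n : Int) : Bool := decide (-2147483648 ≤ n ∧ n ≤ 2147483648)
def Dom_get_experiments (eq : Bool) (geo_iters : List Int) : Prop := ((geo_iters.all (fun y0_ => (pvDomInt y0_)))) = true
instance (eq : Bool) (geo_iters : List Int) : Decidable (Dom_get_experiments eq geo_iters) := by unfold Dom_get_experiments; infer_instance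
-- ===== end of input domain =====

-- B replaces A's six/four explicit extends of hard-coded f-string comprehensions by a
-- data-driven (base, geo-type) combo table per branch and one nested comprehension (simpler).

-- ===== PORT A =====
def get_experiments (eq : Bool) (geo_iters : List Int) : List String :=
  if eq then
    ["Efeq_6pt", "Efeq_6pt_s3", "kFk_9pt"]
      ++ geo_iters.map (fun i => "Efeq_6pt+Geo_VLO_" ++ PySem.Int.toStr i)
      ++ geo_iters.map (fun i => "E_5pt+Geo_VLO_" ++ PySem.Int.toStr i)
      ++ geo_iters.map (fun i => "E_3pt+Geo_VLO_" ++ PySem.Int.toStr i)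
      ++ geo_iters.map (fun i => "Efeq_6pt+Geo_V_" ++ PySem.Int.toStr i)
      ++ geo_iters.map (fun i => "E_5pt+Geo_V_" ++ PySem.Int.toStr i)
      ++ geo_iters.map (fun i => "E_3pt+Geo_V_" ++ PySem.Int.toStr i)
  else
    ["F_7pt", "F_7pt_s3", "k2Fk1_10pt"]
      ++ geo_iters.map (fun i => "E_5pt+Geo_VLO_" ++ PySem.Int.toStr i)
      ++ geo_iters.map (fun i => "E_5pt+Geo_V_" ++ PySem.Int.toStr i)
      ++ geo_iters.map (fun i => "E_3pt+Geo_VLO_" ++ PySem.Int.toStr i)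
      ++ geo_iters.map (fun i => "E_3pt+Geo_V_" ++ PySem.Int.toStr i)

-- ===== PORT B =====
def get_experiments_alt (eq : Bool) (geo_iters : List Int) : List String :=
  let pre : List String :=
    if eq then ["Efeq_6pt", "Efeq_6pt_s3", "kFk_9pt"] else ["F_7pt", "F_7pt_s3", "k2Fk1_10pt"]
  let combos : List (String × String) :=
    if eq then
      (["VLO", "V"].flatMap (fun g => ["Efeq_6pt", "E_5pt", "E_3pt"].map (fun b => (b, g))))
    else
      (["E_5pt", "E_3pt"].flatMap (fun b => ["VLO", "V"].map (fun g => (b, g))))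
  pre ++ combos.flatMap (fun bg =>
    geo_iters.map (fun i => bg.1 ++ "+Geo_" ++ bg.2 ++ "_" ++ PySem.Int.toStr i))

-- ===== PRECONDITION & SPEC =====
def Spec_get_experiments (eq : Bool) (geo_iters : List Int) (out : List String) : Prop := out = get_experiments_alt eq geo_iters
instance (eq : Bool) (geo_iters : List Int) (out : List String) : Decidable (Spec_get_experiments eq geo_iters out) := by unfold Spec_get_experiments; infer_instance

-- ===== CLAIM (what is proved, stated in full; the proofs are below) =====
def Claim_equal_get_experiments : Prop := ∀ (eq : Bool) (geo_iters : List Int), Dom_get_experiments eq geo_iters → Spec_get_experiments eq geo_iters (get_experiments eq geo_iters)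

-- ===== LEMMAS AND PROOFS =====
theorem pv_fmt (a b : String) (t : String) :
    a ++ "+Geo_" ++ b ++ "_" ++ t = (a ++ ("+Geo_" ++ (b ++ "_"))) ++ t := by
  simp [String.append_assoc]

-- ===== VERDICT (by name: the statement is the Claim_ definition above) =====
theorem get_experiments_spec : Claim_equal_get_experiments := by
  intro eq geo_iters _
  unfold Spec_get_experiments get_experiments get_experiments_alt
  cases eq <;>
    simp only [List.flatMap_append, List.flatMap_cons, List.flatMap_nil, List.map_cons,
      List.map_nil, List.append_nil, List.append_assoc, Bool.false_eq_true, if_true, if_false, pv_fmt] <;> rfl
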